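-- pv_equiv track=rewrite | github.com/ahahhh86/AdventOfCode_Python | Puzzles/y2017/day02.py | _calculate_checksum2
-- ===== SOURCE A (Python) =====
-- def _calculate_checksum2(value: list[list[int]]) -> int:
--     result = 0
--     for line in value:
--         dividable = []
--         for i in line:
--             for j in line:
--                 if i != j and i % j == 0:
--                     dividable.append(i // j)
--         result += sum(dividable)
--     return result
-- ===== SOURCE B (Python) =====
-- def _calculate_checksum2(value: list[list[int]]) -> int:
--     # Count duplicates once per line, then scan distinct-value pairs,
--     # weighting each evenly-dividing pair by the product of multiplicities.
--     result = 0
--     for line in value: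
--         counts = {}
--         for x in line:
--             counts[x] = counts.get(x, 0) + 1
--         for a, ca in counts.items():
--             for b, cb in counts.items():
--                 if a != b and a % b == 0:
--                     result += (a // b) * ca * cb
--     return result
-- ===== Notes on version B (the rewrite author's own statement) =====
-- stated objective: alternative
-- what changed: B replaces A's quadratic scan over all element pairs of each line by a count dictionary built in one pass and a double loop over DISTINCT values only, weighting each evenly-dividing pair by the product of multiplicities (and adds into the result directly instead of collecting a quotient list).
import Mathlib
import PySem

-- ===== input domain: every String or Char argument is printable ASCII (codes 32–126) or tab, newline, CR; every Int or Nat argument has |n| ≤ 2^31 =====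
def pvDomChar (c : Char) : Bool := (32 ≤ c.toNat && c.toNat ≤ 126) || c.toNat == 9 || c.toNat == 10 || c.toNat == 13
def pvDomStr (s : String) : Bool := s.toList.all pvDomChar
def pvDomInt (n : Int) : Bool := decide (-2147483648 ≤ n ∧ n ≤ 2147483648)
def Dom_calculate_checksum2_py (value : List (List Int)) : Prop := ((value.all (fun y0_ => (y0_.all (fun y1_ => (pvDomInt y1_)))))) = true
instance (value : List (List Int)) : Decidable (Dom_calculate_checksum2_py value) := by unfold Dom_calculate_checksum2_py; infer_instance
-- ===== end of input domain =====

-- B counts duplicates once per line, then scans pairs of DISTINCT values weighted by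
-- multiplicity products — an alternative decomposition of the same quadratic task.

-- ===== PORT A =====
-- literal transliteration: nested loops over the line collecting quotients in a list, then summing
def calculate_checksum2_py (value : List (List Int)) : Int :=
  value.foldl
    (fun result line =>
      let dividable : List Int :=
        line.foldl
          (fun acc i =>
            line.foldl
              (fun acc j =>
                if i ≠ j ∧ PySem.Int.mod i j = 0 then acc ++ [PySem.Int.floordiv i j] else acc)
              acc)
          []
      result + dividable.sum)
    0

-- ===== PORT B =====
-- literal transliteration of Source B: build a count dict per line, then double loop over its items
def calculate_checksum2_py_alt (value : List (List Int)) : Int :=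
  value.foldl
    (fun result line =>
      let counts : PySem.Dict Int Int :=
        line.foldl (fun d x => d.insert x (d.getD x 0 + 1)) PySem.Dict.empty
      counts.items.foldl
        (fun r p =>
          counts.items.foldl
            (fun r q =>
              if p.1 ≠ q.1 ∧ PySem.Int.mod p.1 q.1 = 0 then
                r + PySem.Int.floordiv p.1 q.1 * p.2 * q.2
              else r)
            r)
        result)
    0

-- ===== PRECONDITION & SPEC =====
-- Pre_ excludes exactly the inputs where Python A raises ZeroDivisionError:
-- a line containing 0 together with some nonzero element (then i % 0 is evaluated).
def Pre_calculate_checksum2_py (value : List (List Int)) : Prop :=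
  ∀ line ∈ value, (0 : Int) ∈ line → ∀ x ∈ line, x = 0
instance (value : List (List Int)) : Decidable (Pre_calculate_checksum2_py value) := by
  unfold Pre_calculate_checksum2_py; infer_instance
def pvWitness_calculate_checksum2_py : List (List Int) := [[2, 4, 8], [9, 3, 9]]
def Spec_calculate_checksum2_py (value : List (List Int)) (out : Int) : Prop := out = calculate_checksum2_py_alt value
instance (value : List (List Int)) (out : Int) : Decidable (Spec_calculate_checksum2_py value out) := by unfold Spec_calculate_checksum2_py; infer_instance

-- ===== CLAIM (what is proved, stated in full; the proofs are below) =====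
def Claim_equal_calculate_checksum2_py : Prop := ∀ (value : List (List Int)), Dom_calculate_checksum2_py value → Pre_calculate_checksum2_py value → Spec_calculate_checksum2_py value (calculate_checksum2_py value)

-- ===== LEMMAS AND PROOFS =====

-- the pair contribution both programs are built around
def pvF (i j : Int) : Int :=
  if i ≠ j ∧ PySem.Int.mod i j = 0 then PySem.Int.floordiv i j else 0

-- the per-line total both programs compute
def pvS (line : List Int) : Int :=
  (line.map (fun i => (line.map (fun j => pvF i j)).sum)).sum

-- A's inner collecting loop, as a sum
theorem aInner (line : List Int) (i : Int) (acc : List Int) :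
    (line.foldl
      (fun acc j =>
        if i ≠ j ∧ PySem.Int.mod i j = 0 then acc ++ [PySem.Int.floordiv i j] else acc)
      acc).sum = acc.sum + (line.map (fun j => pvF i j)).sum := by
  induction line generalizing acc with
  | nil => simp
  | cons j rest ih =>
    simp only [List.foldl_cons, List.map_cons, List.sum_cons, ih, pvF]
    split_ifs
    · simp [List.sum_append]; ring
    · simp

theorem aOuter (outer line : List Int) (acc : List Int) :
    (outer.foldl
      (fun acc i =>
        line.foldl
          (fun acc j =>
            if i ≠ j ∧ PySem.Int.mod i j = 0 then acc ++ [PySem.Int.floordiv i j] else acc)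
          acc)
      acc).sum = acc.sum + (outer.map (fun i => (line.map (fun j => pvF i j)).sum)).sum := by
  induction outer generalizing acc with
  | nil => simp
  | cons i rest ih =>
    simp only [List.foldl_cons, List.map_cons, List.sum_cons, ih, aInner]; ring

-- B's accumulating if-loop, as the accumulator plus a sum
theorem bFold {α : Type} (L : List α) (c : α → Prop) [DecidablePred c] (h : α → Int) (r : Int) :
    L.foldl (fun r q => if c q then r + h q else r) r
      = r + (L.map (fun q => if c q then h q else 0)).sum := by
  induction L generalizing r with
  | nil => simp
  | cons q rest ih =>
    simp only [List.foldl_cons, List.map_cons, List.sum_cons, ih]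
    split_ifs <;> ring

-- a plain accumulating loop, as the accumulator plus a sum
theorem foldlAdd {α : Type} (L : List α) (T : α → Int) (r : Int) :
    L.foldl (fun r p => r + T p) r = r + (L.map T).sum := by
  induction L generalizing r with
  | nil => simp
  | cons p rest ih =>
    simp only [List.foldl_cons, List.map_cons, List.sum_cons, ih]; ring

-- B's nested accumulating loops, as a double sum
theorem bOuter {α : Type} (M L : List α) (c : α → α → Prop) [∀ p q, Decidable (c p q)]
    (h : α → α → Int) (r : Int) :
    M.foldl (fun r p => L.foldl (fun r q => if c p q then r + h p q else r) r) r
      = r + (M.map (fun p => (L.map (fun q => if c p q then h p q else 0)).sum)).sum := by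
  have hstep : (fun (r : Int) (p : α) => L.foldl (fun r q => if c p q then r + h p q else r) r)
      = fun r p => r + (L.map (fun q => if c p q then h p q else 0)).sum := by
    funext r p
    exact bFold L (c p) (h p) r
  rw [hstep, foldlAdd]

-- summing an indicator over a nodup list
theorem sum_indicator (D : List Int) (x : Int) (c : Int) (hD : D.Nodup) :
    (D.map (fun a => if a = x then c else 0)).sum = if x ∈ D then c else 0 := by
  induction D with
  | nil => simp
  | cons a rest ih =>
    simp only [List.nodup_cons] at hD
    simp only [List.map_cons, List.sum_cons, ih hD.2, List.mem_cons]
    by_cases hax : a = x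
    · subst hax
      simp [hD.1]
    · simp [hax, Ne.symm hax]

-- the key counting lemma: summing g weighted by multiplicities over the distinct
-- values of l equals summing g over l itself
theorem sum_count (l : List Int) (g : Int → Int) :
    ((PySem.Set.ofList l).map (fun a => (l.count a : Int) * g a)).sum = (l.map g).sum := by
  induction l using List.reverseRecOn with
  | nil => simp [PySem.Set.ofList]
  | append_singleton l x ih =>
    have hof : PySem.Set.ofList (l ++ [x]) = PySem.Set.add (PySem.Set.ofList l) x := by
      simp [PySem.Set.ofList_eq_foldl]
    have hnd : (PySem.Set.ofList l).Nodup := PySem.Set.nodup_ofList l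
    have hmem : x ∈ PySem.Set.ofList l ↔ x ∈ l := PySem.Set.mem_ofList l x
    have hcount : ∀ a : Int, ((l ++ [x]).count a : Int)
        = (l.count a : Int) + (if a = x then 1 else 0) := by
      intro a
      by_cases hax : a = x
      · subst hax; simp [List.count_append]
      · simp [List.count_append, List.count_singleton, hax]
        exact fun h => hax h.symm
    by_cases hx : x ∈ l
    · have hadd : PySem.Set.add (PySem.Set.ofList l) x = PySem.Set.ofList l := by
        simp [PySem.Set.add, PySem.Set.contains, hmem.mpr hx]
      rw [hof, hadd]
      have split : ((PySem.Set.ofList l).map (fun a => ((l ++ [x]).count a : Int) * g a)).sum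
          = ((PySem.Set.ofList l).map (fun a => (l.count a : Int) * g a)).sum
            + ((PySem.Set.ofList l).map (fun a => if a = x then g x else 0)).sum := by
        rw [← List.sum_map_add]
        apply congrArg
        apply List.map_congr_left
        intro a _
        rw [hcount a]
        by_cases hax : a = x <;> simp [hax] <;> ring
      rw [split, sum_indicator _ _ _ hnd, if_pos (hmem.mpr hx), ih]
      simp
    · have hadd : PySem.Set.add (PySem.Set.ofList l) x = PySem.Set.ofList l ++ [x] := by
        simp [PySem.Set.add, PySem.Set.contains, hmem, hx]
      rw [hof, hadd]
      have heq : (PySem.Set.ofList l).map (fun a => ((l ++ [x]).count a : Int) * g a)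
          = (PySem.Set.ofList l).map (fun a => (l.count a : Int) * g a) := by
        apply List.map_congr_left
        intro a ha
        have hax : a ≠ x := fun h => hx (hmem.mp (h ▸ ha))
        rw [hcount a]
        simp [hax]
      simp only [List.map_append, List.sum_append, heq, List.map_cons, List.map_nil,
        List.sum_cons, List.sum_nil, hcount x, ih]
      simp [List.count_eq_zero_of_not_mem hx]

-- A's per-line work equals pvS
theorem a_line (line : List Int) :
    (line.foldl
      (fun acc i =>
        line.foldl
          (fun acc j =>
            if i ≠ j ∧ PySem.Int.mod i j = 0 then acc ++ [PySem.Int.floordiv i j] else acc)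
          acc)
      ([] : List Int)).sum = pvS line := by
  rw [aOuter]; simp [pvS]

-- B's per-line work equals r + pvS
theorem b_line (line : List Int) (r : Int) :
    (let counts : PySem.Dict Int Int :=
        line.foldl (fun d x => d.insert x (d.getD x 0 + 1)) PySem.Dict.empty
     counts.items.foldl
        (fun r p =>
          counts.items.foldl
            (fun r q =>
              if p.1 ≠ q.1 ∧ PySem.Int.mod p.1 q.1 = 0 then
                r + PySem.Int.floordiv p.1 q.1 * p.2 * q.2
              else r)
            r)
        r) = r + pvS line := by
  have hctr : line.foldl (fun d x => d.insert x (d.getD x 0 + 1)) PySem.Dict.empty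
      = PySem.Dict.counter line := PySem.Dict.foldl_insert_getD_add_one_eq_counter line
  have hitems : (PySem.Dict.counter line).items
      = (PySem.Set.ofList line).map (fun k => (k, (line.count k : Int))) :=
    PySem.Dict.items_counter line
  simp only [hctr, hitems]
  rw [bOuter]
  congr 1
  -- the double sum over distinct values with multiplicities equals pvS
  simp only [List.map_map]
  have inner_eq : ∀ a : Int,
      ((PySem.Set.ofList line).map (fun b =>
          if a ≠ b ∧ PySem.Int.mod a b = 0 then
            PySem.Int.floordiv a b * (line.count a : Int) * (line.count b : Int)
          else 0)).sum
        = (line.count a : Int) * (line.map (fun j => pvF a j)).sum := by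
    intro a
    have step : ((PySem.Set.ofList line).map (fun b =>
          if a ≠ b ∧ PySem.Int.mod a b = 0 then
            PySem.Int.floordiv a b * (line.count a : Int) * (line.count b : Int)
          else 0))
        = ((PySem.Set.ofList line).map (fun b =>
            (line.count a : Int) * ((line.count b : Int) * pvF a b))) := by
      apply List.map_congr_left
      intro b _
      unfold pvF
      split_ifs <;> ring
    rw [step]
    have := sum_count line (fun b => pvF a b)
    calc ((PySem.Set.ofList line).map (fun b =>
            (line.count a : Int) * ((line.count b : Int) * pvF a b))).sum
        = (line.count a : Int)
            * ((PySem.Set.ofList line).map (fun b => (line.count b : Int) * pvF a b)).sum := by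
          rw [← List.sum_map_mul_left]
      _ = (line.count a : Int) * (line.map (fun j => pvF a j)).sum := by rw [this]
  calc ((PySem.Set.ofList line).map (fun a =>
          ((PySem.Set.ofList line).map (fun b =>
            if a ≠ b ∧ PySem.Int.mod a b = 0 then
              PySem.Int.floordiv a b * (line.count a : Int) * (line.count b : Int)
            else 0)).sum)).sum
      = ((PySem.Set.ofList line).map (fun a =>
          (line.count a : Int) * (line.map (fun j => pvF a j)).sum)).sum := by
        apply congrArg
        apply List.map_congr_left
        intro a _
        exact inner_eq a
    _ = pvS line := sum_count line (fun i => (line.map (fun j => pvF i j)).sum)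

theorem folds_eq (value : List (List Int)) (r : Int) :
    value.foldl
      (fun result line =>
        result + (line.foldl
          (fun acc i =>
            line.foldl
              (fun acc j =>
                if i ≠ j ∧ PySem.Int.mod i j = 0 then acc ++ [PySem.Int.floordiv i j] else acc)
              acc)
          ([] : List Int)).sum) r
    = value.foldl
        (fun result line =>
          (let counts : PySem.Dict Int Int :=
            line.foldl (fun d x => d.insert x (d.getD x 0 + 1)) PySem.Dict.empty
          counts.items.foldl
            (fun r p =>
              counts.items.foldl
                (fun r q =>
                  if p.1 ≠ q.1 ∧ PySem.Int.mod p.1 q.1 = 0 then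
                    r + PySem.Int.floordiv p.1 q.1 * p.2 * q.2
                  else r)
                r)
            result)) r := by
  induction value generalizing r with
  | nil => rfl
  | cons line rest ih =>
    simp only [List.foldl_cons]
    rw [b_line, a_line, ih]

-- ===== VERDICT (by name: the statement is the Claim_ definition above) =====
theorem calculate_checksum2_py_spec : Claim_equal_calculate_checksum2_py := by
  intro value _ _
  unfold Spec_calculate_checksum2_py calculate_checksum2_py calculate_checksum2_py_alt
  exact folds_eq value 0
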